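-- pv_equiv track=rewrite | github.com/Reskilll/AgenticEthereumHackathonIndia | backend/audit_mcp_server.py | find_circular_dependencies
-- ===== SOURCE A (Python) =====
-- from typing import List, Dict, Any, Optional
--
-- def find_circular_dependencies(imports: Dict[str, List[str]]) -> List[List[str]]:
--     """Find circular dependencies in import graph."""
--     # Simple cycle detection (could be enhanced)
--     cycles = []
--
--     def has_path(start: str, end: str, visited: set) -> bool:
--         if start == end:
--             return True
--         if start in visited:
--             return False
--
--         visited.add(start)
--         for imported in imports.get(start, []):
--             if has_path(imported, end, visited.copy()):
--                 return True
--         return False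
--
--     for file_path in imports:
--         for imported in imports[file_path]:
--             if has_path(imported, file_path, set()):
--                 cycle = [file_path, imported]
--                 if cycle not in cycles and cycle[::-1] not in cycles:
--                     cycles.append(cycle)
--
--     return cycles
-- ===== SOURCE B (Python) =====
-- def find_circular_dependencies(imports):
--     """Find circular dependencies in import graph."""
--     flat = [w for vs in imports.values() for w in vs]
--     rounds = len(flat) + 2
--
--     def reachable_set(v):
--         # saturate: repeatedly add successors of everything seen
--         seen = {v}
--         for _ in range(rounds):
--             new = {w for x in seen for w in imports.get(x, []) if w not in seen}
--             if not new:
--                 break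
--             seen |= new
--         return seen
--
--     cycles = []
--     for u, vs in imports.items():
--         for v in vs:
--             if u in reachable_set(v):
--                 cycle = [u, v]
--                 if cycle not in cycles and cycle[::-1] not in cycles:
--                     cycles.append(cycle)
--     return cycles
-- ===== Notes on version B (the rewrite author's own statement) =====
-- stated objective: alternative
-- what changed: A decides each edge by a backtracking DFS that passes a fresh copy of the visited set to every branch; B instead computes the reachable set of the edge's target by iterated frontier saturation (a BFS-style closure) and answers with a set-membership test.
import Mathlib
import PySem

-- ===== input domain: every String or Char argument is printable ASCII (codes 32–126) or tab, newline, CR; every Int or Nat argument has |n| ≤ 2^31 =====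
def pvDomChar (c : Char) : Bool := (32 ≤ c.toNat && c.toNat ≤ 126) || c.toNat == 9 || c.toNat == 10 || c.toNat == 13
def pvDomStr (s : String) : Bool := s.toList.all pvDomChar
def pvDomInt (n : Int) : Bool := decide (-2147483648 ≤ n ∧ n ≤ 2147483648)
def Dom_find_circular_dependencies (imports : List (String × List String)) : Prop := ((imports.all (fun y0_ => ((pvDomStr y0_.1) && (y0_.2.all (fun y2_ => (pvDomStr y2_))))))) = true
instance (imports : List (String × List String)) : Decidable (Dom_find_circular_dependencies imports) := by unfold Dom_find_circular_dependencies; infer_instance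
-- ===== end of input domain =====

-- B answers each edge query with a reachable set built by iterated saturation instead
-- of A's backtracking DFS with per-branch copies of visited; the equality proved is about
-- the return value, on dict-shaped inputs (no duplicate keys).

-- shared helper: imports.get(s, [])
def pvAdj (imports : List (String × List String)) (s : String) : List String :=
  PySem.Dict.getD ⟨imports⟩ s []

-- ===== PORT A =====
-- has_path, with fuel for termination; the fuel passed below exceeds the deepest
-- recursion the Python can reach (visited grows by one fresh node per level).
def pvHasPath (imports : List (String × List String)) :
    Nat → String → String → PySem.Set String → Bool
  | 0, _, _, _ => false
  | fuel+1, start, e, visited =>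
    if start == e then true
    else if PySem.Set.contains visited start then false
    else (pvAdj imports start).any (fun m =>
      pvHasPath imports fuel m e (PySem.Set.add visited start))

def find_circular_dependencies (imports : List (String × List String)) : List (List String) :=
  let fuel := ((imports.map (·.2)).flatten).length + 2
  (PySem.Dict.keys (⟨imports⟩ : PySem.Dict String (List String))).foldl (fun cycles fp =>
    (PySem.Dict.getD (⟨imports⟩ : PySem.Dict String (List String)) fp []).foldl (fun cycles imported =>
      if pvHasPath imports fuel imported fp PySem.Set.empty then
        let cycle := [fp, imported]
        if !(cycles.contains cycle) && !(cycles.contains cycle.reverse) then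
          cycles ++ [cycle]
        else cycles
      else cycles) cycles) []

-- ===== PORT B =====
-- one saturation round: new = {w for x in seen for w in imports.get(x, []) if w not in seen}
def pvSaturate (imports : List (String × List String)) :
    Nat → PySem.Set String → PySem.Set String
  | 0, seen => seen
  | k+1, seen =>
    let nw := PySem.Set.ofList
      ((seen.flatMap (pvAdj imports)).filter (fun w => ! PySem.Set.contains seen w))
    if nw.isEmpty then seen
    else pvSaturate imports k (PySem.Set.union seen nw)

def find_circular_dependencies_alt (imports : List (String × List String)) : List (List String) :=
  let rounds := ((imports.map (·.2)).flatten).length + 2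
  imports.foldl (fun cycles p =>
    p.2.foldl (fun cycles v =>
      if PySem.Set.contains (pvSaturate imports rounds (PySem.Set.ofList [v])) p.1 then
        let cycle := [p.1, v]
        if !(cycles.contains cycle) && !(cycles.contains cycle.reverse) then
          cycles ++ [cycle]
        else cycles
      else cycles) cycles) []

-- ===== PRECONDITION & SPEC =====
-- Pre_ excludes association lists with duplicate keys: they cannot arise from the Python
-- function's dict argument (a Python dict collapses a duplicate key before the function
-- ever sees it).
def Pre_find_circular_dependencies (imports : List (String × List String)) : Prop :=
  (imports.map (·.1)).Nodup
instance (imports : List (String × List String)) : Decidable (Pre_find_circular_dependencies imports) := by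
  unfold Pre_find_circular_dependencies; infer_instance

def pvWitness_find_circular_dependencies : (List (String × List String)) :=
  [("a", ["b"]), ("b", ["a", "c"]), ("c", [])]

def Spec_find_circular_dependencies (imports : List (String × List String)) (out : List (List String)) : Prop := out = find_circular_dependencies_alt imports
instance (imports : List (String × List String)) (out : List (List String)) : Decidable (Spec_find_circular_dependencies imports out) := by unfold Spec_find_circular_dependencies; infer_instance

-- ===== CLAIM (what is proved, stated in full; the proofs are below) =====
def Claim_equal_find_circular_dependencies : Prop := ∀ (imports : List (String × List String)), Dom_find_circular_dependencies imports → Pre_find_circular_dependencies imports → Spec_find_circular_dependencies imports (find_circular_dependencies imports)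

-- ===== LEMMAS AND PROOFS =====

-- bounded reachability: pvRb k s e = "there is a walk s → e with at most k edges"
def pvRb (imports : List (String × List String)) : Nat → String → String → Bool
  | 0, s, e => s == e
  | k+1, s, e => s == e || (pvAdj imports s).any (fun m => pvRb imports k m e)

-- walks: pvPath s l e = "l is the node list, after s, of a walk from s ending at e"
def pvPath (imports : List (String × List String)) : String → List String → String → Prop
  | s, [], e => s = e
  | s, x :: l, e => x ∈ pvAdj imports s ∧ pvPath imports x l e

theorem rb_refl (imports : List (String × List String)) (k : Nat) (s : String) :
    pvRb imports k s s = true := by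
  cases k <;> simp [pvRb]

theorem rb_mono (imports : List (String × List String)) (k : Nat) :
    ∀ s e, pvRb imports k s e = true → pvRb imports (k+1) s e = true := by
  induction k with
  | zero =>
    intro s e h
    simp [pvRb] at h ⊢
    exact Or.inl h
  | succ k ih =>
    intro s e h
    rw [pvRb] at h ⊢
    rw [Bool.or_eq_true, List.any_eq_true] at h ⊢
    rcases h with h | ⟨m, hm, hrb⟩
    · exact Or.inl h
    · exact Or.inr ⟨m, hm, ih m e hrb⟩

theorem hasPath_imp_rb (imports : List (String × List String)) (fuel : Nat) :
    ∀ s e vis, pvHasPath imports fuel s e vis = true → pvRb imports fuel s e = true := by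
  induction fuel with
  | zero => intro s e vis h; simp [pvHasPath] at h
  | succ k ih =>
    intro s e vis h
    rw [pvHasPath] at h
    by_cases hse : (s == e) = true
    · rw [pvRb]; simp [hse]
    · rw [if_neg hse] at h
      by_cases hv : PySem.Set.contains vis s = true
      · rw [if_pos hv] at h; cases h
      · rw [if_neg hv, List.any_eq_true] at h
        obtain ⟨m, hm, hp⟩ := h
        rw [pvRb, Bool.or_eq_true, List.any_eq_true]
        exact Or.inr ⟨m, hm, ih m e _ hp⟩

theorem rb_iff_path (imports : List (String × List String)) (k : Nat) :
    ∀ s e, pvRb imports k s e = true ↔ ∃ l, pvPath imports s l e ∧ l.length ≤ k := by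
  induction k with
  | zero =>
    intro s e
    simp only [pvRb, beq_iff_eq]
    constructor
    · intro h; exact ⟨[], h, by simp⟩
    · rintro ⟨l, hp, hl⟩
      have : l = [] := List.eq_nil_of_length_eq_zero (Nat.le_zero.mp hl)
      subst this; exact hp
  | succ k ih =>
    intro s e
    simp only [pvRb, Bool.or_eq_true, beq_iff_eq, List.any_eq_true]
    constructor
    · rintro (h | ⟨m, hm, hrb⟩)
      · exact ⟨[], h, by simp⟩
      · obtain ⟨l, hp, hl⟩ := (ih m e).mp hrb
        exact ⟨m :: l, ⟨hm, hp⟩, by simpa using Nat.succ_le_succ hl⟩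
    · rintro ⟨l, hp, hl⟩
      cases l with
      | nil => exact Or.inl hp
      | cons x t =>
        refine Or.inr ⟨x, hp.1, (ih x e).mpr ⟨t, hp.2, ?_⟩⟩
        have h1 : t.length + 1 ≤ k + 1 := by simpa using hl
        omega

theorem adj_subset (imports : List (String × List String)) (s : String) :
    pvAdj imports s ⊆ (imports.map (·.2)).flatten := by
  induction imports with
  | nil => simp [pvAdj, PySem.Dict.getD, PySem.Dict.get?]
  | cons p rest ih =>
    intro x hx
    simp only [pvAdj, PySem.Dict.getD] at hx ih
    rw [PySem.Dict.get?_mk_cons] at hx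
    by_cases hk : (p.1 == s) = true
    · simp only [hk, if_true, Option.getD_some] at hx
      simp only [List.map_cons, List.flatten_cons, List.mem_append]
      exact Or.inl hx
    · simp only [hk] at hx
      simp only [List.map_cons, List.flatten_cons, List.mem_append]
      exact Or.inr (ih hx)

theorem path_elems (imports : List (String × List String)) :
    ∀ l s e, pvPath imports s l e → ∀ x ∈ l, x ∈ (imports.map (·.2)).flatten := by
  intro l
  induction l with
  | nil => intro s e _ x hx; simp at hx
  | cons a t ih =>
    intro s e hp x hx
    rcases List.mem_cons.mp hx with rfl | hx
    · exact adj_subset imports s hp.1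
    · exact ih a e hp.2 x hx

theorem path_split (imports : List (String × List String)) :
    ∀ l₁ s e x l₂, pvPath imports s (l₁ ++ x :: l₂) e → pvPath imports x l₂ e := by
  intro l₁
  induction l₁ with
  | nil => intro s e x l₂ h; exact h.2
  | cons a t ih => intro s e x l₂ h; exact ih a e x l₂ h.2

theorem path_graft (imports : List (String × List String)) :
    ∀ l₁ s e x l₂ l₂', pvPath imports s (l₁ ++ x :: l₂) e → pvPath imports x l₂' e →
      pvPath imports s (l₁ ++ x :: l₂') e := by
  intro l₁
  induction l₁ with
  | nil => intro s e x l₂ l₂' h h'; exact ⟨h.1, h'⟩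
  | cons a t ih => intro s e x l₂ l₂' h h'; exact ⟨h.1, ih a e x l₂ l₂' h.2 h'⟩

theorem not_nodup_decomp {α : Type} :
    ∀ (l : List α), ¬ l.Nodup → ∃ (a : α) (p q r : List α), l = p ++ a :: q ++ a :: r := by
  intro l
  induction l with
  | nil => intro h; exact absurd List.nodup_nil h
  | cons x t ih =>
    intro h
    rw [List.nodup_cons] at h
    push_neg at h
    by_cases hx : x ∈ t
    · obtain ⟨q, r, rfl⟩ := List.append_of_mem hx
      exact ⟨x, [], q, r, by simp⟩
    · obtain ⟨a, p, q, r, rfl⟩ := ih (h hx)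
      exact ⟨a, x :: p, q, r, by simp⟩

theorem path_shorten (imports : List (String × List String)) (e : String) :
    ∀ n l s, l.length ≤ n → pvPath imports s l e →
      ∃ l', pvPath imports s l' e ∧ ((s :: l').dropLast).Nodup := by
  intro n
  induction n with
  | zero =>
    intro l s hl hp
    have : l = [] := List.eq_nil_of_length_eq_zero (Nat.le_zero.mp hl)
    subst this
    exact ⟨[], hp, by simp⟩
  | succ n ih =>
    intro l s hl hp
    by_cases hnd : ((s :: l).dropLast).Nodup
    · exact ⟨l, hp, hnd⟩
    · rcases List.eq_nil_or_concat l with rfl | ⟨l₀, b, rfl⟩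
      · simp at hnd
      · rw [List.concat_eq_append] at hl hp hnd
        have hdl : ((s :: (l₀ ++ [b])).dropLast) = s :: l₀ := by
          rw [show s :: (l₀ ++ [b]) = (s :: l₀) ++ [b] by simp]
          exact List.dropLast_concat
        rw [hdl, List.nodup_cons] at hnd
        push_neg at hnd
        by_cases hs : s ∈ l₀
        · obtain ⟨p, q, rfl⟩ := List.append_of_mem hs
          have hp' : pvPath imports s (q ++ [b]) e := by
            apply path_split imports p s e s (q ++ [b])
            rw [show p ++ s :: q ++ [b] = p ++ s :: (q ++ [b]) by simp] at hp
            exact hp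
          apply ih (q ++ [b]) s _ hp'
          have := hl
          simp only [List.length_append, List.length_cons] at this ⊢
          omega
        · have hnd' : ¬ l₀.Nodup := hnd hs
          obtain ⟨a, p, q, r, rfl⟩ := not_nodup_decomp l₀ hnd'
          have hre : (p ++ a :: q ++ a :: r) ++ [b] = p ++ a :: (q ++ a :: (r ++ [b])) := by
            simp
          rw [hre] at hp
          have h1 : pvPath imports a (q ++ a :: (r ++ [b])) e :=
            path_split imports p s e a _ hp
          have h2 : pvPath imports a (r ++ [b]) e :=
            path_split imports q a e a _ h1
          have h3 : pvPath imports s (p ++ a :: (r ++ [b])) e :=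
            path_graft imports p s e a _ _ hp h2
          apply ih (p ++ a :: (r ++ [b])) s _ h3
          have := hl
          simp only [List.length_append, List.length_cons] at this ⊢
          omega

theorem contains_eq_false_iff {s : PySem.Set String} {x : String} :
    PySem.Set.contains s x = false ↔ ¬ x ∈ s := by
  rw [← Bool.not_eq_true, PySem.Set.contains_iff]

theorem path_to_hasPath (imports : List (String × List String)) (e : String) :
    ∀ fuel l s vis, pvPath imports s l e → ((s :: l).dropLast).Nodup →
      (∀ x ∈ (s :: l).dropLast, PySem.Set.contains vis x = false) →
      l.length < fuel → pvHasPath imports fuel s e vis = true := by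
  intro fuel
  induction fuel with
  | zero => intro l s vis _ _ _ hlen; omega
  | succ k ih =>
    intro l s vis hp hnd hvis hlen
    rw [pvHasPath]
    by_cases hse : (s == e) = true
    · rw [if_pos hse]
    · rw [if_neg hse]
      cases l with
      | nil => exact absurd (beq_iff_eq.mpr hp) hse
      | cons x t =>
        have hdl : ((s :: x :: t).dropLast) = s :: (x :: t).dropLast := rfl
        have hsmem : s ∈ (s :: x :: t).dropLast := by rw [hdl]; exact List.mem_cons_self ..
        rw [hvis s hsmem, if_neg Bool.false_ne_true, List.any_eq_true]
        refine ⟨x, hp.1, ?_⟩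
        apply ih t x (PySem.Set.add vis s) hp.2
        · rw [hdl, List.nodup_cons] at hnd; exact hnd.2
        · intro y hy
          have hy' : y ∈ (s :: x :: t).dropLast := by rw [hdl]; exact List.mem_cons_of_mem _ hy
          have hys : y ≠ s := by
            rw [hdl, List.nodup_cons] at hnd
            intro h; subst h; exact hnd.1 hy
          rw [contains_eq_false_iff, PySem.Set.mem_add]
          push_neg
          exact ⟨contains_eq_false_iff.mp (hvis y hy'), hys⟩
        · have h1 := hlen
          simp only [List.length_cons] at h1
          omega

theorem rb_closed (imports : List (String × List String)) (seen : PySem.Set String)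
    (hcl : ∀ x ∈ seen, ∀ w ∈ pvAdj imports x, w ∈ seen) :
    ∀ j s u, s ∈ seen → pvRb imports j s u = true → u ∈ seen := by
  intro j
  induction j with
  | zero => intro s u hs h; rw [pvRb, beq_iff_eq] at h; exact h ▸ hs
  | succ j ih =>
    intro s u hs h
    simp only [pvRb, Bool.or_eq_true, beq_iff_eq, List.any_eq_true] at h
    rcases h with rfl | ⟨m, hm, hrb⟩
    · exact hs
    · exact ih m u (hcl s hs m hm) hrb

theorem saturate_mem (imports : List (String × List String)) :
    ∀ k (seen : PySem.Set String) u,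
      u ∈ pvSaturate imports k seen ↔ ∃ s ∈ seen, pvRb imports k s u = true := by
  intro k
  induction k with
  | zero =>
    intro seen u
    simp only [pvSaturate, pvRb, beq_iff_eq]
    exact ⟨fun h => ⟨u, h, rfl⟩, fun ⟨s, hs, he⟩ => he ▸ hs⟩
  | succ k ih =>
    intro seen u
    rw [pvSaturate]
    by_cases hem :
        (PySem.Set.ofList
          ((seen.flatMap (pvAdj imports)).filter (fun w => ! PySem.Set.contains seen w))).isEmpty = true
    · simp only [hem, if_true]
      -- the new-elements set is empty, so seen is closed under pvAdj
      have hcl : ∀ x ∈ seen, ∀ w ∈ pvAdj imports x, w ∈ seen := by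
        intro x hx w hw
        by_contra hns
        have hmem : w ∈ PySem.Set.ofList
            ((seen.flatMap (pvAdj imports)).filter (fun w => ! PySem.Set.contains seen w)) := by
          rw [PySem.Set.mem_ofList, List.mem_filter]
          refine ⟨List.mem_flatMap.mpr ⟨x, hx, hw⟩, ?_⟩
          simp only [Bool.not_eq_true']
          exact contains_eq_false_iff.mpr hns
        rw [List.isEmpty_iff] at hem
        rw [hem] at hmem
        simp at hmem
      constructor
      · intro h; exact ⟨u, h, rb_refl imports _ u⟩
      · rintro ⟨s, hs, hrb⟩; exact rb_closed imports seen hcl _ s u hs hrb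
    · rw [if_neg hem, ih]
      constructor
      · rintro ⟨s', hs', hrb⟩
        rcases (PySem.Set.mem_union _ _ s').mp hs' with hseen | hnw
        · exact ⟨s', hseen, rb_mono imports k s' u hrb⟩
        · rw [PySem.Set.mem_ofList, List.mem_filter] at hnw
          obtain ⟨x, hx, hadj⟩ := List.mem_flatMap.mp hnw.1
          refine ⟨x, hx, ?_⟩
          simp only [pvRb, Bool.or_eq_true, List.any_eq_true]
          exact Or.inr ⟨s', hadj, hrb⟩
      · rintro ⟨s, hs, hrb⟩
        simp only [pvRb, Bool.or_eq_true, beq_iff_eq, List.any_eq_true] at hrb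
        rcases hrb with rfl | ⟨m, hm, hrb⟩
        · exact ⟨s, (PySem.Set.mem_union _ _ s).mpr (Or.inl hs), rb_refl imports k s⟩
        · by_cases hms : m ∈ seen
          · exact ⟨m, (PySem.Set.mem_union _ _ m).mpr (Or.inl hms), hrb⟩
          · refine ⟨m, (PySem.Set.mem_union _ _ m).mpr (Or.inr ?_), hrb⟩
            rw [PySem.Set.mem_ofList, List.mem_filter]
            refine ⟨List.mem_flatMap.mpr ⟨s, hs, hm⟩, ?_⟩
            simp only [Bool.not_eq_true']
            exact contains_eq_false_iff.mpr hms

theorem edge_test_eq (imports : List (String × List String)) (u v : String)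
    (hv : v ∈ (imports.map (·.2)).flatten) :
    pvHasPath imports (((imports.map (·.2)).flatten).length + 2) v u PySem.Set.empty =
    PySem.Set.contains
      (pvSaturate imports (((imports.map (·.2)).flatten).length + 2) (PySem.Set.ofList [v])) u := by
  rw [Bool.eq_iff_iff]
  rw [PySem.Set.contains_iff, saturate_mem]
  constructor
  · intro h
    refine ⟨v, ?_, hasPath_imp_rb imports _ v u _ h⟩
    rw [PySem.Set.mem_ofList]; simp
  · rintro ⟨s, hs, hrb⟩
    rw [PySem.Set.mem_ofList] at hs
    simp only [List.mem_singleton] at hs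
    rw [← hs] at hv ⊢
    obtain ⟨l, hp, _⟩ := (rb_iff_path imports _ s u).mp hrb
    obtain ⟨l', hp', hnd⟩ := path_shorten imports u l.length l s le_rfl hp
    have hsub : ((s :: l').dropLast) ⊆ (imports.map (·.2)).flatten := by
      intro x hx
      have hx' : x ∈ s :: l' := List.dropLast_subset _ hx
      rcases List.mem_cons.mp hx' with rfl | hx'
      · exact hv
      · exact path_elems imports l' s u hp' x hx'
    have hlen : l'.length < ((imports.map (·.2)).flatten).length + 2 := by
      have h1 : ((s :: l').dropLast).length ≤ ((imports.map (·.2)).flatten).length := by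
        calc ((s :: l').dropLast).length
            = ((s :: l').dropLast).toFinset.card := (List.toFinset_card_of_nodup hnd).symm
          _ ≤ ((imports.map (·.2)).flatten).toFinset.card :=
              Finset.card_le_card (fun x hx => List.mem_toFinset.mpr
                (hsub (List.mem_toFinset.mp hx)))
          _ ≤ ((imports.map (·.2)).flatten).length := List.toFinset_card_le _
      have h2 : ((s :: l').dropLast).length = l'.length := by simp
      omega
    apply path_to_hasPath imports u _ l' s PySem.Set.empty hp' hnd _ hlen
    intro x _
    rw [contains_eq_false_iff]
    simp [PySem.Set.empty]

theorem getD_mem_self (imports : List (String × List String))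
    (h : (imports.map (·.1)).Nodup) :
    ∀ p ∈ imports, PySem.Dict.getD (⟨imports⟩ : PySem.Dict String (List String)) p.1 [] = p.2 := by
  induction imports with
  | nil => intro p hp; simp at hp
  | cons q rest ih =>
    obtain ⟨qk, qv⟩ := q
    intro p hp
    simp only [List.map_cons, List.nodup_cons] at h
    rcases List.mem_cons.mp hp with rfl | hp'
    · rw [PySem.Dict.getD, PySem.Dict.get?_mk_cons]
      simp
    · have hne : (qk == p.1) = false := by
        rw [beq_eq_false_iff_ne]
        intro he
        exact h.1 (he ▸ List.mem_map.mpr ⟨p, hp', rfl⟩)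
      rw [PySem.Dict.getD, PySem.Dict.get?_mk_cons, hne, if_neg Bool.false_ne_true]
      have hrest := ih h.2 p hp'
      rwa [PySem.Dict.getD] at hrest

-- ===== VERDICT (by name: the statement is the Claim_ definition above) =====
theorem find_circular_dependencies_spec : Claim_equal_find_circular_dependencies := by
  intro imports _ hpre
  unfold Spec_find_circular_dependencies
  unfold find_circular_dependencies find_circular_dependencies_alt
  simp only [PySem.Dict.keys]
  rw [List.foldl_map]
  apply PySem.List.foldl_congr_mem
  intro acc p hp
  rw [getD_mem_self imports hpre p hp]
  apply PySem.List.foldl_congr_mem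
  intro acc' v hv
  have hvflat : v ∈ (imports.map (·.2)).flatten :=
    List.mem_flatten.mpr ⟨p.2, List.mem_map.mpr ⟨p, hp, rfl⟩, hv⟩
  rw [edge_test_eq imports p.1 v hvflat]
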